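-- pv_equiv track=rewrite | github.com/Owen-Huggins/CS-Projects | CS 1301/HW06.py | flightFinder
-- ===== SOURCE A (Python) =====
-- def flightFinder(flightInfo, city):
--     for key in flightInfo.keys():
--         if key == city:
--             if flightInfo[key] == {}:
--                 return("No Flights")
--             cheapest = min(flightInfo[key].values())
--             for x in flightInfo[key].keys():
--                 if flightInfo[key][x] == cheapest:
--                     return(x)
--     return("No Flights")
-- ===== SOURCE B (Python) =====
-- def flightFinder(flightInfo, city):
--     if city not in flightInfo:
--         return "No Flights"
--     best = None
--     for dest, cost in flightInfo[city].items():
--         if best is None or cost < best[1]: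
--             best = (dest, cost)
--     return "No Flights" if best is None else best[0]
-- ===== Notes on version B (the rewrite author's own statement) =====
-- stated objective: simpler
-- what changed: Replaces A's manual key scan for the city plus min-then-rescan over the flight dict with a direct membership test/lookup and one tracking pass over items keeping the first strictly-cheapest (dest, cost).
import Mathlib
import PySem

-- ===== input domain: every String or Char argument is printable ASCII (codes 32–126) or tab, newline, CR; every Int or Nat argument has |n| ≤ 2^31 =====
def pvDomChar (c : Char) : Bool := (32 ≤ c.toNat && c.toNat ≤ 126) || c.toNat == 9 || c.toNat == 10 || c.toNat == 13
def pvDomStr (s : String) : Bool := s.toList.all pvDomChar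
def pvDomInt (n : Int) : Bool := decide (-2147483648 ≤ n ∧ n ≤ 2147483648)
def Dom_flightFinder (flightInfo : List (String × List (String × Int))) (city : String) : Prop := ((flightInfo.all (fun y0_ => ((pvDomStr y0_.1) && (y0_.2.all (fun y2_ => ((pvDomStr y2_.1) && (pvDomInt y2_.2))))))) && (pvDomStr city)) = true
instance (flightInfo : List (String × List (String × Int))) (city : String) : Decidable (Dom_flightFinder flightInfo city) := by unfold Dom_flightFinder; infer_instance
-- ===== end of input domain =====

-- B replaces A's key scan plus min-then-rescan with a direct lookup and one first-strict-minimum tracking pass (simpler).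

-- ===== PORT A =====
-- inner loop of A: 'for x in flightInfo[key].keys(): if flightInfo[key][x] == cheapest: return x'
-- (get? = none would be a KeyError and never fires since x is drawn from d's own keys: skipping there is a totality guard)
def pvScanA (d : PySem.Dict String Int) (cheapest : Int) : List String → Option String
  | [] => none
  | x :: ks =>
    match d.get? x with
    | some v => if v == cheapest then some x else pvScanA d cheapest ks
    | none => pvScanA d cheapest ks

-- outer loop of A: 'for key in flightInfo.keys(): if key == city: …' — iterated as the dict's (key, value) items,
-- exact since each key of the dict pairs with the value 'flightInfo[key]' looks up
def pvLoopA (city : String) : List (String × PySem.Dict String Int) → String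
  | [] => "No Flights"
  | (key, inner) :: rest =>
    if key == city then
      if inner.items.isEmpty then "No Flights"
      else
        match PySem.List.min? inner.values (fun v => v) with   -- min(flightInfo[key].values())
        | some cheapest =>
          match pvScanA inner cheapest inner.keys with
          | some x => x
          | none => pvLoopA city rest     -- inner loop exhausted without returning: outer loop continues
        | none => pvLoopA city rest       -- unreachable (values nonempty): totality guard
    else pvLoopA city rest

def flightFinder (flightInfo : List (String × List (String × Int))) (city : String) : String :=
  let d : PySem.Dict String (PySem.Dict String Int) :=
    PySem.Dict.ofList (flightInfo.map (fun p => (p.1, PySem.Dict.ofList p.2)))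
  pvLoopA city d.items

-- ===== PORT B =====
def flightFinder_alt (flightInfo : List (String × List (String × Int))) (city : String) : String :=
  let d : PySem.Dict String (PySem.Dict String Int) :=
    PySem.Dict.ofList (flightInfo.map (fun p => (p.1, PySem.Dict.ofList p.2)))
  match d.get? city with
  | none => "No Flights"      -- 'if city not in flightInfo'
  | some inner =>
    let best := inner.items.foldl
      (fun best p =>
        match best with
        | none => some p
        | some b => if p.2 < b.2 then some p else some b) none
    match best with
    | none => "No Flights"
    | some b => b.1

-- ===== PRECONDITION & SPEC =====
def Spec_flightFinder (flightInfo : List (String × List (String × Int))) (city : String) (out : String) : Prop := out = flightFinder_alt flightInfo city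
instance (flightInfo : List (String × List (String × Int))) (city : String) (out : String) : Decidable (Spec_flightFinder flightInfo city out) := by unfold Spec_flightFinder; infer_instance

-- ===== CLAIM (what is proved, stated in full; the proofs are below) =====
def Claim_equal_flightFinder : Prop := ∀ (flightInfo : List (String × List (String × Int))) (city : String), Dom_flightFinder flightInfo city → Spec_flightFinder flightInfo city (flightFinder flightInfo city)

-- ===== LEMMAS AND PROOFS =====

-- 'sel b l' = the first strictly-minimal pair among b :: l (the option-stripped tracking loop)
def pvSel (b : String × Int) (l : List (String × Int)) : String × Int :=
  l.foldl (fun b p => if p.2 < b.2 then p else b) b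

theorem pvSel_cons (b p : String × Int) (l : List (String × Int)) :
    pvSel b (p :: l) = pvSel (if p.2 < b.2 then p else b) l := rfl

theorem pvSel_eq_or_lt (l : List (String × Int)) : ∀ b, pvSel b l = b ∨ (pvSel b l).2 < b.2 := by
  induction l with
  | nil => intro b; exact Or.inl rfl
  | cons p l ih =>
    intro b
    rw [pvSel_cons]
    by_cases h : p.2 < b.2
    · simp only [h, if_pos]
      rcases ih p with h1 | h1
      · right; rw [h1]; exact h
      · right; exact lt_trans h1 h
    · simp only [h, if_neg, not_false_iff]; exact ih b

theorem pvSel_le (l : List (String × Int)) (b : String × Int) : (pvSel b l).2 ≤ b.2 := by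
  rcases pvSel_eq_or_lt l b with h | h
  · rw [h]
  · exact le_of_lt h

-- B's option fold is pvSel once seeded
theorem foldB_some (l : List (String × Int)) : ∀ b : String × Int,
    l.foldl (fun best p =>
      match best with
      | none => some p
      | some b => if p.2 < b.2 then some p else some b) (some b) = some (pvSel b l) := by
  induction l with
  | nil => intro b; rfl
  | cons p l ih =>
    intro b
    simp only [List.foldl_cons]
    by_cases h : p.2 < b.2 <;> simp only [h, if_pos, if_neg, not_false_iff] <;>
      [rw [ih p, pvSel_cons, if_pos h]; rw [ih b, pvSel_cons, if_neg h]]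

-- A's min(values) is the value of pvSel
theorem minfold_map (l : List (String × Int)) : ∀ acc : Option (String × Int),
    (l.map (·.2)).foldl (fun acc x =>
      match acc with
      | none => some x
      | some m => if x < m then some x else some m) (acc.map (·.2))
    = (l.foldl (fun best p =>
      match best with
      | none => some p
      | some b => if p.2 < b.2 then some p else some b) acc).map (·.2) := by
  induction l with
  | nil => intro acc; rfl
  | cons p l ih =>
    intro acc
    simp only [List.map_cons, List.foldl_cons]
    cases acc with
    | none => exact ih (some p)
    | some m =>
      by_cases h : p.2 < m.2 <;> simp only [Option.map_some, h, if_pos, if_neg, not_false_iff] <;>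
        [exact ih (some p); exact ih (some m)]

theorem min?_values (b : String × Int) (l : List (String × Int)) :
    PySem.List.min? ((b :: l).map (·.2)) (fun v => v) = some ((pvSel b l).2) := by
  have h := minfold_map (b :: l) none
  simp only [Option.map_none] at h
  have hstep : PySem.List.min? ((b :: l).map (·.2)) (fun v => v) =
      ((b :: l).map (·.2)).foldl (fun acc x =>
        match acc with
        | none => some x
        | some m => if x < m then some x else some m) none := by
    unfold PySem.List.min?
    congr 1
    funext acc x
    cases acc <;> rfl
  rw [hstep, h]
  show Option.map (fun x => x.2) (l.foldl (fun best p =>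
      match best with
      | none => some p
      | some b => if p.2 < b.2 then some p else some b) (some b)) = some ((pvSel b l).2)
  rw [foldB_some l b]
  rfl

-- the first pair whose value is the minimum is pvSel itself
theorem find?_sel (l : List (String × Int)) : ∀ b,
    (b :: l).find? (fun p => p.2 == (pvSel b l).2) = some (pvSel b l) := by
  induction l with
  | nil => intro b; simp [pvSel, List.find?]
  | cons p l ih =>
    intro b
    by_cases h : p.2 < b.2
    · rw [pvSel_cons, if_pos h]
      have hlt : (pvSel p l).2 < b.2 := lt_of_le_of_lt (pvSel_le l p) h
      rw [List.find?_cons_of_neg (by simp; omega)]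
      exact ih p
    · rw [pvSel_cons, if_neg h]
      by_cases he : b.2 = (pvSel b l).2
      · have hb : pvSel b l = b := by
          rcases pvSel_eq_or_lt l b with h1 | h1
          · exact h1
          · omega
        rw [List.find?_cons_of_pos (by simp [he])]
        rw [hb]
      · have hlt : (pvSel b l).2 < b.2 := by
          rcases pvSel_eq_or_lt l b with h1 | h1
          · rw [h1] at he; omega
          · exact h1
        have hp : ¬ (p.2 = (pvSel b l).2) := by omega
        rw [List.find?_cons_of_neg (by simp [he]), List.find?_cons_of_neg (by simp [hp])]
        have := ih b
        rw [List.find?_cons_of_neg (by simp; omega)] at this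
        exact this

-- pvScanA ignores a leading item whose key none of the scanned keys equals
theorem pvScanA_shadow (k : String) (v : Int) (t : List (String × Int)) (c : Int) :
    ∀ ks : List String, (∀ x ∈ ks, x ≠ k) →
    pvScanA (PySem.Dict.mk ((k, v) :: t)) c ks = pvScanA (PySem.Dict.mk t) c ks := by
  intro ks
  induction ks with
  | nil => intro _; rfl
  | cons x ks ih =>
    intro h
    have hx : x ≠ k := h x (List.mem_cons_self)
    have htl : ∀ y ∈ ks, y ≠ k := fun y hy => h y (List.mem_cons_of_mem _ hy)
    unfold pvScanA
    rw [PySem.Dict.get?_mk_cons, if_neg (by simp only [beq_iff_eq]; exact fun he => hx he.symm)]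
    cases hg : PySem.Dict.get? (PySem.Dict.mk t) x with
    | none => exact ih htl
    | some w =>
      show (if (w == c) = true then some x else pvScanA (PySem.Dict.mk ((k, v) :: t)) c ks)
        = (if (w == c) = true then some x else pvScanA (PySem.Dict.mk t) c ks)
      by_cases hw : (w == c) = true
      · rw [if_pos hw, if_pos hw]
      · rw [if_neg hw, if_neg hw]
        exact ih htl

-- A's inner scan over the dict's own (nodup) keys is first-match over its items
theorem pvScanA_mk (c : Int) : ∀ l : List (String × Int), (l.map (·.1)).Nodup →
    pvScanA (PySem.Dict.mk l) c (l.map (·.1)) = (l.find? (fun p => p.2 == c)).map (·.1) := by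
  intro l
  induction l with
  | nil => intro _; rfl
  | cons p t ih =>
    intro hnd
    obtain ⟨k, v⟩ := p
    simp only [List.map_cons, List.nodup_cons] at hnd
    rw [List.map_cons]
    unfold pvScanA
    rw [PySem.Dict.get?_mk_cons, if_pos (show (k == k) = true by simp)]
    show (if (v == c) = true then some k
        else pvScanA (PySem.Dict.mk ((k, v) :: t)) c (t.map (·.1)))
      = (((k, v) :: t).find? (fun p => p.2 == c)).map (·.1)
    by_cases hv : (v == c) = true
    · rw [if_pos hv, List.find?_cons_of_pos (by simpa using hv), Option.map_some]
    · rw [if_neg hv, List.find?_cons_of_neg (by simpa using hv),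
        pvScanA_shadow k v t c _ (fun x hx he => hnd.1 (he ▸ hx))]
      exact ih hnd.2

-- every inner dict built by the ports has nodup keys
theorem values_ofList_mem {κ ν : Type} [BEq κ] [LawfulBEq κ] (pairs : List (κ × ν)) :
    ∀ (d : PySem.Dict κ ν) (v : ν),
      v ∈ (pairs.foldl (fun d p => d.insert p.1 p.2) d).values → v ∈ d.values ∨ v ∈ pairs.map (·.2) := by
  induction pairs with
  | nil => intro d v h; exact Or.inl h
  | cons p t ih =>
    intro d v h
    rcases ih (d.insert p.1 p.2) v h with h1 | h1
    · rcases PySem.Dict.mem_values_insert d p.1 p.2 v h1 with h2 | h2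
      · right; rw [h2]; exact List.mem_cons_self
      · exact Or.inl h2
    · right; exact List.mem_cons_of_mem _ h1

-- A's outer loop over the dict's items = first-match lookup followed by B's body on the inner dict
theorem pvLoopA_eq (city : String) : ∀ l : List (String × PySem.Dict String Int),
    (∀ p ∈ l, p.2.keys.Nodup) →
    pvLoopA city l =
      (match (PySem.Dict.mk l).get? city with
       | none => "No Flights"
       | some inner =>
         match inner.items.foldl
            (fun best p =>
              match best with
              | none => some p
              | some b => if p.2 < b.2 then some p else some b) none with
         | none => "No Flights"
         | some b => b.1) := by
  intro l
  induction l with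
  | nil => intro _; rfl
  | cons q rest ih =>
    intro hnd
    obtain ⟨key, inner⟩ := q
    rw [PySem.Dict.get?_mk_cons]
    unfold pvLoopA
    by_cases hk : key == city
    · rw [hk]
      simp only [if_pos]
      rcases hi : inner.items with _ | ⟨p, ps⟩
      · rfl
      · simp only [List.isEmpty_cons, Bool.false_eq_true, if_neg, not_false_iff]
        have hkeys : inner.keys = inner.items.map (·.1) := rfl
        have hvals : inner.values = inner.items.map (·.2) := rfl
        have hmk : PySem.Dict.mk inner.items = inner := by cases inner; rfl
        have hmin : PySem.List.min? inner.values (fun v => v) = some ((pvSel p ps).2) := by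
          rw [hvals, hi]; exact min?_values p ps
        have hnd' : (inner.items.map (·.1)).Nodup := by
          rw [← hkeys]; exact hnd (key, inner) List.mem_cons_self
        have hscan : pvScanA inner ((pvSel p ps).2) inner.keys = some ((pvSel p ps).1) := by
          rw [hkeys, ← hmk, pvScanA_mk _ inner.items hnd', hi, find?_sel ps p]
          rfl
        have hL : (match PySem.List.min? inner.values (fun v => v) with
            | some cheapest =>
              match pvScanA inner cheapest inner.keys with
              | some x => x
              | none => pvLoopA city rest
            | none => pvLoopA city rest) = (pvSel p ps).1 := by
          rw [hmin]
          show (match pvScanA inner ((pvSel p ps).2) inner.keys with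
            | some x => x
            | none => pvLoopA city rest) = (pvSel p ps).1
          rw [hscan]
        have hR : (match (p :: ps).foldl
              (fun best p =>
                match best with
                | none => some p
                | some b => if p.2 < b.2 then some p else some b) none with
            | none => "No Flights"
            | some b => b.1) = (pvSel p ps).1 := by
          show (match ps.foldl
              (fun best p =>
                match best with
                | none => some p
                | some b => if p.2 < b.2 then some p else some b) (some p) with
            | none => "No Flights"
            | some b => b.1) = (pvSel p ps).1
          rw [foldB_some ps p]
        rw [hL, hR]
    · have hk' : (key == city) = false := by
        cases h : (key == city) with
        | true => exact absurd h hk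
        | false => rfl
      rw [hk']
      simp only [Bool.false_eq_true, if_neg, not_false_iff]
      exact ih (fun p hp => hnd p (List.mem_cons_of_mem _ hp))

-- ===== VERDICT (by name: the statement is the Claim_ definition above) =====
theorem flightFinder_spec : Claim_equal_flightFinder := by
  intro flightInfo city _
  unfold Spec_flightFinder flightFinder flightFinder_alt
  simp only []
  set d := PySem.Dict.ofList (flightInfo.map (fun p => (p.1, PySem.Dict.ofList p.2))) with hd
  have hmk : PySem.Dict.mk d.items = d := by cases d; rfl
  have hnd : ∀ p ∈ d.items, p.2.keys.Nodup := by
    intro p hp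
    have hv : p.2 ∈ d.values := by
      simp only [PySem.Dict.values]
      exact List.mem_map_of_mem hp
    have h12 : p.2 ∈ (PySem.Dict.empty : PySem.Dict String (PySem.Dict String Int)).values ∨
        p.2 ∈ ((flightInfo.map (fun q => (q.1, PySem.Dict.ofList q.2))).map (·.2)) :=
      values_ofList_mem _ PySem.Dict.empty p.2 hv
    rcases h12 with h1 | h1
    · simp [PySem.Dict.empty, PySem.Dict.values] at h1
    · simp only [List.map_map, List.mem_map] at h1
      obtain ⟨q, _, hq⟩ := h1
      rw [← hq]
      exact PySem.Dict.nodup_keys_ofList q.2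
  rw [pvLoopA_eq city d.items hnd, hmk]
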